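-- pv_equiv track=rewrite | github.com/antoine78910/variator | generate.py | _app_combo_indices
-- ===== SOURCE A (Python) =====
-- APP_FOLDERS = ["find_app", "create_store_app", "create_ai_ugc_app"]
--
-- def _app_combo_indices(step_images: dict, variation_index: int) -> dict[str, int]:
--     """Indices pour chaque dossier app (find, create_store, create_ai_ugc) pour avoir toutes les combinaisons."""
--     lengths = [len(step_images.get(k) or []) for k in APP_FOLDERS]
--     if not all(lengths):
--         return {APP_FOLDERS[i]: variation_index % max(1, lengths[i]) for i in range(len(APP_FOLDERS))}
--     n_combos = 1
--     for L in lengths: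
--         n_combos *= L
--     combo = variation_index % n_combos
--     indices = {}
--     for i, name in enumerate(APP_FOLDERS):
--         indices[name] = combo % lengths[i]
--         combo //= lengths[i]
--     return indices
-- ===== SOURCE B (Python) =====
-- APP_FOLDERS = ["find_app", "create_store_app", "create_ai_ugc_app"]
--
-- def _app_combo_indices(step_images: dict, variation_index: int) -> dict[str, int]:
--     """Same indices, but by materializing the full combination table and indexing into it."""
--     lengths = [len(step_images.get(k) or []) for k in APP_FOLDERS]
--     if not all(lengths):
--         return {k: variation_index % max(1, L) for k, L in zip(APP_FOLDERS, lengths)}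
--     combos = [[]]
--     for L in reversed(lengths):
--         combos = [t + [i] for t in combos for i in range(L)]
--     chosen = combos[variation_index % len(combos)]
--     return dict(zip(APP_FOLDERS, reversed(chosen)))
-- ===== Notes on version B (the rewrite author's own statement) =====
-- stated objective: alternative
-- what changed: B replaces A's in-place mixed-radix decode (repeated % and //= on a running combo) by materializing the full table of index combinations (a hand-rolled itertools.product over the reversed lengths) and indexing into it with variation_index % len(combos); the degenerate-length branch becomes a zip comprehension.
import Mathlib
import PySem

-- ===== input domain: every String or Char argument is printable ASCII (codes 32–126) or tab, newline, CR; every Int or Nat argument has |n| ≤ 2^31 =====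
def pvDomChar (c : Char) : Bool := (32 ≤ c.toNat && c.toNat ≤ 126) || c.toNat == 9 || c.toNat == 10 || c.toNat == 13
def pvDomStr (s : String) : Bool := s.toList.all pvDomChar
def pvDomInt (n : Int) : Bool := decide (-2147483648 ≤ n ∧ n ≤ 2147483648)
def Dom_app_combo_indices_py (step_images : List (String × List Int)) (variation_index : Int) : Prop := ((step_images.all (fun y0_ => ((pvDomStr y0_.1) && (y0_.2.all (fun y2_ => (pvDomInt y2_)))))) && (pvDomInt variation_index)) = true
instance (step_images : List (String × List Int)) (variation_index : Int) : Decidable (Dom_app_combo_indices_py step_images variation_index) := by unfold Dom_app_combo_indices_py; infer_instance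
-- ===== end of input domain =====

-- B materializes the full table of index combinations (a hand-rolled itertools.product
-- over the reversed lengths) and indexes into it, instead of A's in-place mixed-radix decode.

-- ===== PORT A =====
def pvAppFolders : List String := ["find_app", "create_store_app", "create_ai_ugc_app"]

-- lengths = [len(step_images.get(k) or []) for k in APP_FOLDERS]  (this line is verbatim in A and B)
def pvLengths (step_images : List (String × List Int)) : List Int :=
  pvAppFolders.map (fun k => ((((PySem.Dict.mk step_images).get? k).getD []).length : Int))

def app_combo_indices_py (step_images : List (String × List Int)) (variation_index : Int) : List (String × Int) :=
  let lengths := pvLengths step_images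
  if !(lengths.all (fun L => !(L == 0))) then
    ((PySem.List.pyRange 0 ((pvAppFolders.length : Int)) 1).foldl
      (fun (d : PySem.Dict String Int) i =>
        d.insert (PySem.List.pyGetD pvAppFolders i "")
                 (PySem.Int.mod variation_index (max 1 (PySem.List.pyGetD lengths i 0))))
      PySem.Dict.empty).items
  else
    let n_combos := lengths.foldl (· * ·) 1
    let combo := PySem.Int.mod variation_index n_combos
    (((PySem.List.enumerate pvAppFolders).foldl
      (fun (st : PySem.Dict String Int × Int) p =>
        (st.1.insert p.2 (PySem.Int.mod st.2 (PySem.List.pyGetD lengths p.1 0)),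
         PySem.Int.floordiv st.2 (PySem.List.pyGetD lengths p.1 0)))
      (PySem.Dict.empty, combo)).1).items

-- ===== PORT B =====
-- one pass of the loop body: combos = [t + [i] for t in combos for i in range(L)]
def pvProdStep (cs : List (List Int)) (L : Int) : List (List Int) :=
  cs.flatMap (fun t => (PySem.List.pyRange 0 L 1).map (fun i => t ++ [i]))

def app_combo_indices_py_alt (step_images : List (String × List Int)) (variation_index : Int) : List (String × Int) :=
  let lengths := pvLengths step_images
  if !(lengths.all (fun L => !(L == 0))) then
    (pvAppFolders.zip lengths).map (fun kl => (kl.1, PySem.Int.mod variation_index (max 1 kl.2)))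
  else
    let combos := lengths.reverse.foldl pvProdStep [[]]
    let chosen := PySem.List.pyGetD combos (PySem.Int.mod variation_index (combos.length : Int)) []
    pvAppFolders.zip chosen.reverse

-- ===== PRECONDITION & SPEC =====
def Spec_app_combo_indices_py (step_images : List (String × List Int)) (variation_index : Int) (out : List (String × Int)) : Prop := out = app_combo_indices_py_alt step_images variation_index
instance (step_images : List (String × List Int)) (variation_index : Int) (out : List (String × Int)) : Decidable (Spec_app_combo_indices_py step_images variation_index out) := by unfold Spec_app_combo_indices_py; infer_instance

-- ===== CLAIM (what is proved, stated in full; the proofs are below) =====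
def Claim_equal_app_combo_indices_py : Prop := ∀ (step_images : List (String × List Int)) (variation_index : Int), Dom_app_combo_indices_py step_images variation_index → Spec_app_combo_indices_py step_images variation_index (app_combo_indices_py step_images variation_index)

-- ===== LEMMAS AND PROOFS =====

-- indexing a flatMap whose pieces all have the same positive length k
theorem pv_getElem?_flatMap_const {α β : Type} (f : α → List β) (k : Nat) (hk : 0 < k)
    (hlen : ∀ x, (f x).length = k) :
    ∀ (xs : List α) (j : Nat),
      (xs.flatMap f)[j]? = xs[j / k]?.bind (fun x => (f x)[j % k]?) := by
  intro xs
  induction xs with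
  | nil => intro j; simp
  | cons x xs ih =>
    intro j
    rw [List.flatMap_cons]
    by_cases hj : j < k
    · rw [List.getElem?_append_left (by rw [hlen]; exact hj)]
      rw [Nat.div_eq_of_lt hj, Nat.mod_eq_of_lt hj]
      simp
    · replace hj : k ≤ j := Nat.le_of_not_lt hj
      rw [List.getElem?_append_right (by rw [hlen]; exact hj)]
      rw [hlen]
      have hrepr : j = (j - k) + k := by omega
      rw [ih (j - k)]
      rw [hrepr, Nat.add_div_right _ hk, Nat.add_mod_right]
      simp

theorem pv_prodStep_length (cs : List (List Int)) (n : Nat) :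
    (pvProdStep cs (n : Int)).length = cs.length * n := by
  simp [pvProdStep, List.length_flatMap, PySem.List.length_pyRange_one]

theorem pv_prodStep_get (cs : List (List Int)) (n j : Nat) (hn : 0 < n) :
    (pvProdStep cs (n : Int))[j]? =
      cs[j / n]?.bind (fun t => some (t ++ [((j % n : Nat) : Int)])) := by
  unfold pvProdStep
  rw [pv_getElem?_flatMap_const (fun t => (PySem.List.pyRange 0 (n : Int) 1).map (fun i => t ++ [i])) n hn
      (by intro t; simp [PySem.List.length_pyRange_one]) cs j]
  rcases h : cs[j / n]? with _ | t
  · rfl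
  · simp only [Option.bind_some]
    rw [PySem.List.getElem?_map_pyRange_zero _ n (j % n) (Nat.mod_lt _ hn)]

theorem pv_eval_degenerate (v a b c : Int) :
    ((PySem.List.pyRange 0 ((pvAppFolders.length : Int)) 1).foldl
      (fun (d : PySem.Dict String Int) i =>
        d.insert (PySem.List.pyGetD pvAppFolders i "")
                 (PySem.Int.mod v (max 1 (PySem.List.pyGetD [a, b, c] i 0))))
      PySem.Dict.empty).items
    = (pvAppFolders.zip [a, b, c]).map (fun kl => (kl.1, PySem.Int.mod v (max 1 kl.2))) := by
  have hr : PySem.List.pyRange 0 ((pvAppFolders.length : Int)) 1 = [0, 1, 2] := by decide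
  rw [hr]
  simp [pvAppFolders, List.foldl, PySem.List.pyGetD, PySem.List.pyGet?, PySem.List.pyIdx?,
    PySem.Dict.insert, PySem.Dict.contains, PySem.Dict.empty]

theorem pv_eval_enum_fold (v a b c : Int) :
    (((PySem.List.enumerate pvAppFolders).foldl
      (fun (st : PySem.Dict String Int × Int) p =>
        (st.1.insert p.2 (PySem.Int.mod st.2 (PySem.List.pyGetD [a, b, c] p.1 0)),
         PySem.Int.floordiv st.2 (PySem.List.pyGetD [a, b, c] p.1 0)))
      (PySem.Dict.empty, v)).1).items
    = [("find_app", PySem.Int.mod v a),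
       ("create_store_app", PySem.Int.mod (PySem.Int.floordiv v a) b),
       ("create_ai_ugc_app", PySem.Int.mod (PySem.Int.floordiv (PySem.Int.floordiv v a) b) c)] := by
  simp [pvAppFolders, PySem.List.enumerate, List.foldl, PySem.List.pyGetD, PySem.List.pyGet?,
    PySem.List.pyIdx?, PySem.Dict.insert, PySem.Dict.contains, PySem.Dict.empty]

theorem pv_combos_get (n0 n1 n2 j : Nat) (h0 : 0 < n0) (h1 : 0 < n1) (h2 : 0 < n2)
    (hj : j < n2 * n1 * n0) :
    (pvProdStep (pvProdStep (pvProdStep [[]] (n2 : Int)) (n1 : Int)) (n0 : Int))[j]? =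
      some [((j / n0 / n1 : Nat) : Int), ((j / n0 % n1 : Nat) : Int), ((j % n0 : Nat) : Int)] := by
  have hb0 : j / n0 < n2 * n1 := (Nat.div_lt_iff_lt_mul h0).2 hj
  have hb1 : j / n0 / n1 < n2 := (Nat.div_lt_iff_lt_mul h1).2 hb0
  rw [pv_prodStep_get _ n0 j h0, pv_prodStep_get _ n1 (j / n0) h1,
      pv_prodStep_get _ n2 (j / n0 / n1) h2]
  rw [Nat.div_eq_of_lt hb1, Nat.mod_eq_of_lt hb1]
  simp

theorem pv_core (step_images : List (String × List Int)) (v : Int) (n0 n1 n2 : Nat)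
    (hL : pvLengths step_images = [(n0 : Int), (n1 : Int), (n2 : Int)]) :
    app_combo_indices_py step_images v = app_combo_indices_py_alt step_images v := by
  unfold app_combo_indices_py app_combo_indices_py_alt
  rw [hL]
  by_cases hpos : 0 < n0 ∧ 0 < n1 ∧ 0 < n2
  · obtain ⟨h0, h1, h2⟩ := hpos
    have hg : (List.all [(n0 : Int), (n1 : Int), (n2 : Int)] (fun L => !(L == 0))) = true := by
      simp only [List.all_cons, List.all_nil, Bool.and_eq_true, Bool.not_eq_true', beq_eq_false_iff_ne,
        ne_eq, Int.natCast_eq_zero]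
      refine ⟨by omega, by omega, by omega, trivial⟩
    simp only [hg, Bool.not_true, Bool.false_eq_true, if_false]
    -- A side: n_combos and the enumerate fold
    rw [pv_eval_enum_fold]
    -- B side: combos
    simp only [List.reverse_cons, List.reverse_nil, List.nil_append, List.cons_append,
      List.foldl_cons, List.foldl_nil]
    have hClen : (pvProdStep (pvProdStep (pvProdStep [[]] (n2 : Int)) (n1 : Int)) (n0 : Int)).length
        = n2 * n1 * n0 := by
      rw [pv_prodStep_length, pv_prodStep_length, pv_prodStep_length]
      simp [Nat.mul_assoc]
    have hNpos : 0 < n2 * n1 * n0 := by positivity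
    have hN : ((1 * (n0 : Int)) * (n1 : Int)) * (n2 : Int) = ((n2 * n1 * n0 : Nat) : Int) := by
      push_cast; ring
    set m : Int := PySem.Int.mod v ((n2 * n1 * n0 : Nat) : Int) with hm
    have hposI : (0 : Int) < ((n2 * n1 * n0 : Nat) : Int) := by exact_mod_cast hNpos
    have hm0 : 0 ≤ m := PySem.Int.mod_nonneg _ hposI
    have hmlt : m < ((n2 * n1 * n0 : Nat) : Int) := PySem.Int.mod_lt _ hposI
    set j : Nat := m.toNat with hjdef
    have hmj : m = (j : Int) := (Int.toNat_of_nonneg hm0).symm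
    have hjlt : j < n2 * n1 * n0 := by omega
    have hjb : j / n0 / n1 < n2 :=
      (Nat.div_lt_iff_lt_mul h1).2 ((Nat.div_lt_iff_lt_mul h0).2 hjlt)
    rw [hN, hClen, ← hm, hmj]
    have hchosen : PySem.List.pyGetD
        (pvProdStep (pvProdStep (pvProdStep [[]] (n2 : Int)) (n1 : Int)) (n0 : Int)) ((j : Nat) : Int) []
        = [((j / n0 / n1 : Nat) : Int), ((j / n0 % n1 : Nat) : Int), ((j % n0 : Nat) : Int)] := by
      rw [PySem.List.pyGetD_natCast, List.getD_eq_getElem?_getD,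
        pv_combos_get n0 n1 n2 j h0 h1 h2 hjlt, Option.getD_some]
    rw [hchosen]
    simp only [List.reverse_cons, List.reverse_nil, List.nil_append, List.cons_append,
      pvAppFolders, List.zip, List.zipWith]
    rw [PySem.Int.mod_natCast, PySem.Int.floordiv_natCast, PySem.Int.mod_natCast,
      PySem.Int.floordiv_natCast, PySem.Int.mod_natCast]
    rw [Nat.mod_eq_of_lt hjb]
  · have hg : (List.all [(n0 : Int), (n1 : Int), (n2 : Int)] (fun L => !(L == 0))) = false := by
      simp only [List.all_cons, List.all_nil, Bool.and_true, Bool.and_eq_false_iff,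
        Bool.not_eq_false', beq_iff_eq, Int.natCast_eq_zero]
      omega
    simp only [hg, Bool.not_false, if_true]
    exact pv_eval_degenerate v _ _ _

theorem app_combo_indices_py_spec : Claim_equal_app_combo_indices_py := by
  intro si v _
  unfold Spec_app_combo_indices_py
  exact pv_core si v
    ((((PySem.Dict.mk si).get? "find_app").getD []).length)
    ((((PySem.Dict.mk si).get? "create_store_app").getD []).length)
    ((((PySem.Dict.mk si).get? "create_ai_ugc_app").getD []).length)
    (by simp [pvLengths, pvAppFolders])
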